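-- pv_equiv track=rewrite | github.com/huishingchong/cookie-audit-tool | consentcrawl/output.py | fmt_seen_at
-- ===== SOURCE A (Python) =====
-- from typing import Any, Dict, Iterable, List, Optional, Tuple
--
-- def fmt_seen_at(urls: List[str], limit: int = 12) -> List[str]:
--     if not urls:
--         return []
--     if len(urls) <= limit:
--         return [f"  - seen_at_urls:"] + [f"    • {u}" for u in urls]
--     head = urls[:limit]
--     rest = len(urls) - limit
--     return [f"  - seen_at_urls:"] + [f"    • {u}" for u in head] + [f"    • … (+{rest} more)"]
-- ===== SOURCE B (Python) =====
-- def fmt_seen_at(urls, limit=12):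
--     n = len(urls)
--     if n == 0:
--         return []
--     truncated = 0 <= limit < n
--     shown = limit if truncated else n
--     total = 1 + shown + (1 if truncated else 0)
--     def line(j):
--         if j == 0:
--             return "  - seen_at_urls:"
--         if truncated and j == total - 1:
--             return f"    \u2022 \u2026 (+{n - limit} more)"
--         return f"    \u2022 {urls[j - 1]}"
--     return [line(j) for j in range(total)]
-- ===== Notes on version B (the rewrite author's own statement) =====
-- stated objective: alternative
-- what changed: B computes the output length arithmetically up front (total = 1 + shown + overflow flag) and builds the list by mapping one index-to-line function over range(total), instead of A's branch on len(urls)<=limit with head-slice plus list concatenations.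
-- intended difference: For a nonempty urls list with a negative limit, A slices urls[:limit] from the tail and reports '+(len(urls)-limit) more' (more items than the list has), while B lists all URLs with no truncation line; a negative cap cannot meaningfully truncate, so B's full listing is the intended display. — e.g. on fmt_seen_at(["a"], -2): A returns [" - seen_at_urls:", " • … (+3 more)"], B returns [" - seen_at_urls:", " • a"]
import Mathlib
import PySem

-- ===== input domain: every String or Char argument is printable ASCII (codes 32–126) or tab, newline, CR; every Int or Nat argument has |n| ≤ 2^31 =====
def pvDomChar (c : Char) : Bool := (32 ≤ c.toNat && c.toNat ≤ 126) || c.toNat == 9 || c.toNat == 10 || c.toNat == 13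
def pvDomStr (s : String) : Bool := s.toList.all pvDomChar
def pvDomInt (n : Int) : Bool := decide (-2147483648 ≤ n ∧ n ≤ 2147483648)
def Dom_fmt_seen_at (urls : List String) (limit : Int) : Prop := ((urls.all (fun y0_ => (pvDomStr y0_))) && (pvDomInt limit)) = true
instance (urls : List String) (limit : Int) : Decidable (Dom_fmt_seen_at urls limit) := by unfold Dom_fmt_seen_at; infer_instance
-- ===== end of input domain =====

-- B builds the output positionally: compute total = 1 + shown + overflow flag arithmetically, then map one
-- index→line function over range(total) — no slicing, no concatenation of staged pieces; objective: alternative.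
-- ===== PORT A =====
def fmt_seen_at (urls : List String) (limit : Int) : List String :=
  if urls = [] then []
  else if (urls.length : Int) ≤ limit then
    "  - seen_at_urls:" :: urls.map (fun u => "    • " ++ u)
  else
    let head := PySem.List.slice urls none (some limit)
    let rest : Int := (urls.length : Int) - limit
    "  - seen_at_urls:" ::
      (head.map (fun u => "    • " ++ u) ++ ["    • … (+" ++ PySem.Int.toStr rest ++ " more)"])

-- ===== PORT B =====
def fmt_seen_at_alt (urls : List String) (limit : Int) : List String :=
  let n : Int := urls.length
  if n = 0 then []
  else
    let truncated : Bool := decide (0 ≤ limit ∧ limit < n)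
    let shown : Int := if truncated then limit else n
    let total : Int := 1 + shown + (if truncated then 1 else 0)
    (PySem.List.pyRange 0 total 1).map (fun j =>
      if j = 0 then "  - seen_at_urls:"
      else if truncated && decide (j = total - 1) then
        "    • … (+" ++ PySem.Int.toStr (n - limit) ++ " more)"
      else "    • " ++ PySem.List.pyGetD urls (j - 1) "")

-- ===== PRECONDITION & SPEC =====
-- For a nonempty list with a negative limit, A slices urls[:limit] from the tail and reports "+(len(urls)-limit) more"
-- (more items than the list even has); B lists all URLs with no truncation line, the intended display for a cap that
-- cannot meaningfully truncate.
def D_fmt_seen_at (urls : List String) (limit : Int) : Prop := urls ≠ [] ∧ limit < 0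
instance (urls : List String) (limit : Int) : Decidable (D_fmt_seen_at urls limit) := by
  unfold D_fmt_seen_at; infer_instance

def Spec_fmt_seen_at (urls : List String) (limit : Int) (out : List String) : Prop := ¬ D_fmt_seen_at urls limit → out = fmt_seen_at_alt urls limit
instance (urls : List String) (limit : Int) (out : List String) : Decidable (Spec_fmt_seen_at urls limit out) := by unfold Spec_fmt_seen_at; infer_instance

def pvDiffWitness_fmt_seen_at : List String × Int := (["a"], -2)
def pvDiffWitnessOut_fmt_seen_at : (List String) × (List String) :=
  (["  - seen_at_urls:", "    • … (+3 more)"], ["  - seen_at_urls:", "    • a"])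

-- ===== CLAIM (what is proved, stated in full; the proofs are below) =====
def Claim_unchanged_fmt_seen_at : Prop := ∀ (urls : List String) (limit : Int), Dom_fmt_seen_at urls limit → Spec_fmt_seen_at urls limit (fmt_seen_at urls limit)
def Claim_changed_fmt_seen_at : Prop := Dom_fmt_seen_at (pvDiffWitness_fmt_seen_at.1) (pvDiffWitness_fmt_seen_at.2) ∧ D_fmt_seen_at (pvDiffWitness_fmt_seen_at.1) (pvDiffWitness_fmt_seen_at.2) ∧ fmt_seen_at (pvDiffWitness_fmt_seen_at.1) (pvDiffWitness_fmt_seen_at.2) = pvDiffWitnessOut_fmt_seen_at.1 ∧ fmt_seen_at_alt (pvDiffWitness_fmt_seen_at.1) (pvDiffWitness_fmt_seen_at.2) = pvDiffWitnessOut_fmt_seen_at.2 ∧ pvDiffWitnessOut_fmt_seen_at.1 ≠ pvDiffWitnessOut_fmt_seen_at.2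
def Claim_exact_fmt_seen_at : Prop := ∀ (urls : List String) (limit : Int), Dom_fmt_seen_at urls limit → D_fmt_seen_at urls limit → fmt_seen_at urls limit ≠ fmt_seen_at_alt urls limit

-- ===== LEMMAS AND PROOFS =====

-- A = B when the whole list fits (0 ≤ limit helps only through n ≤ limit keeping 'truncated' false).
theorem fmt_eq_of_le (urls : List String) (limit : Int) (hne : urls ≠ [])
    (hle : (urls.length : Int) ≤ limit) :
    fmt_seen_at urls limit = fmt_seen_at_alt urls limit := by
  have hn0 : (urls.length : Int) ≠ 0 := by
    simpa using fun h => hne (List.length_eq_zero_iff.mp h)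
  have htr : decide (0 ≤ limit ∧ limit < (urls.length : Int)) = false := by
    simp; omega
  simp only [fmt_seen_at, fmt_seen_at_alt, if_neg hne, if_pos hle, if_neg hn0, htr,
    Bool.false_and]
  rw [PySem.List.pyRange_one]
  simp only [Bool.false_eq_true, if_false, List.map_map]
  apply List.ext_getElem
  · simp; omega
  · intro i h1 h2
    simp only [List.getElem_map, List.getElem_range, Function.comp]
    rcases Nat.eq_zero_or_pos i with hi | hi
    · subst hi; simp
    · have hj0 : (0 : Int) + (i : Int) ≠ 0 := by omega
      have hidx : (0 : Int) + (i : Int) - 1 = ((i - 1 : Nat) : Int) := by omega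
      rw [if_neg hj0, hidx, PySem.List.pyGetD_natCast]
      have hlt : i - 1 < urls.length := by
        simp at h1; omega
      rw [List.getD_eq_getElem _ _ hlt]
      rcases i with _ | i
      · omega
      · simp

-- A = B in the truncating case 0 ≤ limit < len(urls).
theorem fmt_eq_of_lt (urls : List String) (limit : Int) (hne : urls ≠ []) (hl : 0 ≤ limit)
    (hle : limit < (urls.length : Int)) :
    fmt_seen_at urls limit = fmt_seen_at_alt urls limit := by
  have hn0 : (urls.length : Int) ≠ 0 := by
    simpa using fun h => hne (List.length_eq_zero_iff.mp h)
  have htr : decide (0 ≤ limit ∧ limit < (urls.length : Int)) = true := by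
    simp; omega
  have hs : PySem.List.slice urls none (some limit) = urls.take limit.toNat :=
    PySem.List.slice_to urls hl
  simp only [fmt_seen_at, fmt_seen_at_alt, if_neg hne, if_neg (not_le.mpr hle), if_neg hn0, htr,
    hs, if_true, Bool.true_and]
  rw [PySem.List.pyRange_one]
  apply List.ext_getElem
  · simp; omega
  · intro i h1 h2
    simp only [List.getElem_map, List.getElem_range]
    have hlen : (urls.take limit.toNat).length = limit.toNat := by
      simp; omega
    have hi1 : i < limit.toNat + 2 := by simp at h2; omega
    rcases Nat.eq_zero_or_pos i with hi | hi
    · subst hi; simp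
    · have hj0 : (0 : Int) + (i : Int) ≠ 0 := by omega
      rw [if_neg hj0]
      by_cases hlast : i = limit.toNat + 1
      · have hd : decide ((0:Int) + (i : Int) = 1 + limit + 1 - 1) = true := by
          simp; omega
        rw [hd, if_pos rfl]
        subst hlast
        rw [List.getElem_cons_succ]
        have hm : (List.map (fun u => "    • " ++ u) (List.take limit.toNat urls)).length = limit.toNat := by
          simp
          omega
        rw [List.getElem_append_right (by rw [hm] : (List.map (fun u => "    • " ++ u) (List.take limit.toNat urls)).length ≤ limit.toNat)]
        simp
      · have hd : decide ((0:Int) + (i : Int) = 1 + limit + 1 - 1) = false := by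
          simp; omega
        rw [hd]
        simp only [Bool.false_eq_true, if_false]
        have hidx : (0 : Int) + (i : Int) - 1 = ((i - 1 : Nat) : Int) := by omega
        rw [hidx, PySem.List.pyGetD_natCast]
        have hlt : i - 1 < limit.toNat := by omega
        have hlt2 : i - 1 < urls.length := by omega
        rw [List.getD_eq_getElem _ _ hlt2]
        rcases i with _ | i
        · omega
        · simp only [List.getElem_cons_succ]
          rw [List.getElem_append_left (by simp; omega)]
          simp [List.getElem_take]

-- ===== VERDICT (by name: the statements are the Claim_ definitions above) =====
theorem fmt_seen_at_spec : Claim_unchanged_fmt_seen_at := by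
  intro urls limit _hdom
  unfold Spec_fmt_seen_at D_fmt_seen_at
  intro hnd
  by_cases hne : urls = []
  · simp [fmt_seen_at, fmt_seen_at_alt, hne]
  · have hl : 0 ≤ limit := by by_contra h; exact hnd ⟨hne, by omega⟩
    by_cases hle : (urls.length : Int) ≤ limit
    · exact fmt_eq_of_le urls limit hne hle
    · exact fmt_eq_of_lt urls limit hne hl (by omega)

theorem fmt_seen_at_changed : Claim_changed_fmt_seen_at := by unfold Claim_changed_fmt_seen_at; decide

theorem fmt_seen_at_tight : Claim_exact_fmt_seen_at := by
  intro urls limit hdom hd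
  obtain ⟨hne, hneg⟩ := hd
  intro heq
  have hn1 : 0 < urls.length := List.length_pos_iff.mpr hne
  have hn0 : (urls.length : Int) ≠ 0 := by omega
  have hnle : ¬ ((urls.length : Int) ≤ limit) := by omega
  have htr : decide (0 ≤ limit ∧ limit < (urls.length : Int)) = false := by simp; omega
  set more := "    • … (+" ++ PySem.Int.toStr ((urls.length : Int) - limit) ++ " more)" with hmore
  have hmem : more ∈ fmt_seen_at urls limit := by
    simp only [fmt_seen_at, if_neg hne, if_neg hnle, List.mem_cons, List.mem_append]
    right; right; exact Or.inl hmore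
  rw [heq] at hmem
  have hP : ('…' : Char) ∈ more.toList := by
    rw [hmore]
    simp only [String.toList_append, List.mem_append]
    left; left; decide
  simp only [fmt_seen_at_alt, if_neg hn0, htr, Bool.false_and, Bool.false_eq_true, if_false,
    List.mem_map] at hmem
  obtain ⟨j, hj, hfj⟩ := hmem
  rw [PySem.List.mem_pyRange_one] at hj
  by_cases hj0 : j = 0
  · rw [if_pos hj0] at hfj
    rw [← hfj] at hP
    exact absurd hP (by decide)
  · rw [if_neg hj0] at hfj
    rw [← hfj, String.toList_append] at hP
    rcases List.mem_append.mp hP with h | h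
    · exact absurd h (by decide)
    · have hin : PySem.List.pyGetD urls (j - 1) "" ∈ urls := by
        apply PySem.List.pyGetD_mem
        unfold PySem.Raise.InRange
        omega
      have hdall : ∀ u ∈ urls, pvDomStr u = true := by
        unfold Dom_fmt_seen_at at hdom
        simp only [Bool.and_eq_true, List.all_eq_true] at hdom
        exact fun u hu => hdom.1 u hu
      have hdomu : pvDomStr (PySem.List.pyGetD urls (j - 1) "") = true := hdall _ hin
      have := (List.all_eq_true.mp (by simpa [pvDomStr] using hdomu)) _ h
      simp [pvDomChar] at this
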